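-- pv_equiv track=rewrite | github.com/kjocevicius/advent-of-code | 2020/06/day6-2.py | readGroups
-- ===== SOURCE A (Python) =====
-- def readGroups(lines: list[str]) -> list[set]:
--
--     groups: list = []
--     group = set()
--     newGroup = True
--
--     for line in lines:
--         line = line.strip()
--
--         if len(line) == 0:
--             groups.append(group)
--             group = set()
--             newGroup = True
--             continue
--
--         if newGroup:
--             newGroup = False
--             for letter in line:
--                 group.add(letter)
--         else:
--             group = group.intersection(line)
--
--     groups.append(group)
--     return groups
-- ===== SOURCE B (Python) =====
-- def readGroups(lines: list[str]) -> list[set]: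
--     # Phase 1: split stripped lines into groups at blank lines (keeping empty groups)
--     groups = []
--     cur = []
--     for line in lines:
--         s = line.strip()
--         if s:
--             cur.append(s)
--         else:
--             groups.append(cur)
--             cur = []
--     groups.append(cur)
--     # Phase 2: each group's answer is the intersection of its lines' letter sets
--     return [set.intersection(*map(set, g)) if g else set() for g in groups]
-- ===== Notes on version B (the rewrite author's own statement) =====
-- stated objective: simpler
-- what changed: Two-phase decomposition: first split the stripped lines into groups at blank lines (keeping empty groups), then map each group to the intersection of its per-line letter sets, dropping A's newGroup flag and interleaved state machine.
import Mathlib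
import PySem

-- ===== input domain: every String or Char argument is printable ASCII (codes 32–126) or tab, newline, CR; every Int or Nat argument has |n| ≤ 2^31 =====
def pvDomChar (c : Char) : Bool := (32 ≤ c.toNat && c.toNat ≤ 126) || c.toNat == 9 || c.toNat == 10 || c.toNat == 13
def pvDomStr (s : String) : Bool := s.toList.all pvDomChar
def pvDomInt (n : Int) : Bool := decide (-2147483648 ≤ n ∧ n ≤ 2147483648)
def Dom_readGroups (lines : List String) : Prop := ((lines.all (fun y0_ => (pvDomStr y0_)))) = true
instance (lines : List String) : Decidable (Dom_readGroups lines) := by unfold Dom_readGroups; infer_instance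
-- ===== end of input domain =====

-- B replaces A's interleaved newGroup/accumulator state machine by a two-phase
-- decomposition (split into groups of stripped lines, then map each group to the
-- intersection of its per-line letter sets); objective: simpler.

-- Python iterates over a string's characters; each letter is a 1-char string.
def pvChars (s : String) : List String := s.toList.map (fun c => String.ofList [c])

-- ===== PORT A =====
-- state: (groups, group, newGroup)
def readGroupsStepA (st : List (List String) × List String × Bool) (line : String) :
    List (List String) × List String × Bool :=
  let l := PySem.Str.strip line
  if l.toList.isEmpty then (st.1 ++ [st.2.1], [], true)
  else if st.2.2 then (st.1, (pvChars l).foldl PySem.Set.add st.2.1, false)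
  else (st.1, PySem.Set.inter st.2.1 (pvChars l), false)

def readGroups (lines : List String) : List (List String) :=
  let st := lines.foldl readGroupsStepA ([], [], true)
  st.1 ++ [st.2.1]

-- ===== PORT B =====
-- Phase 1: split stripped lines into groups at blank lines (keeping empty groups).
def pvSplitStep (st : List (List String) × List String) (line : String) :
    List (List String) × List String :=
  let s := PySem.Str.strip line
  if s.toList.isEmpty then (st.1 ++ [st.2], []) else (st.1, st.2 ++ [s])

def pvSplitGroups (lines : List String) : List (List String) :=
  let st := lines.foldl pvSplitStep ([], [])
  st.1 ++ [st.2]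

-- Phase 2: intersection of the per-line letter sets of a group (set() for an empty group).
def pvInterAll (g : List String) : List String :=
  match g with
  | [] => PySem.Set.empty
  | h :: t => t.foldl (fun s l => PySem.Set.inter s (pvChars l)) (PySem.Set.ofList (pvChars h))

def readGroups_alt (lines : List String) : List (List String) :=
  (pvSplitGroups lines).map pvInterAll

-- ===== PRECONDITION & SPEC =====
def Spec_readGroups (lines : List String) (out : List (List String)) : Prop := out = readGroups_alt lines
instance (lines : List String) (out : List (List String)) : Decidable (Spec_readGroups lines out) := by unfold Spec_readGroups; infer_instance

-- ===== CLAIM (what is proved, stated in full; the proofs are below) =====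
def Claim_equal_readGroups : Prop := ∀ (lines : List String), Dom_readGroups lines → Spec_readGroups lines (readGroups lines)

-- ===== LEMMAS AND PROOFS =====

lemma pvInterAll_append (cur : List String) (l : String) (h : cur ≠ []) :
    pvInterAll (cur ++ [l]) = PySem.Set.inter (pvInterAll cur) (pvChars l) := by
  cases cur with
  | nil => exact absurd rfl h
  | cons a t => simp [pvInterAll, List.foldl_append]

lemma pv_main (lines : List String) (acc : List (List String)) (cur : List String) :
    lines.foldl readGroupsStepA (acc.map pvInterAll, pvInterAll cur, cur.isEmpty) =
      ((lines.foldl pvSplitStep (acc, cur)).1.map pvInterAll,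
       pvInterAll (lines.foldl pvSplitStep (acc, cur)).2,
       (lines.foldl pvSplitStep (acc, cur)).2.isEmpty) := by
  induction lines generalizing acc cur with
  | nil => rfl
  | cons line rest ih =>
    simp only [List.foldl_cons]
    by_cases hb : PySem.Chars.strip line.toList = []
    · have hA : readGroupsStepA (acc.map pvInterAll, pvInterAll cur, cur.isEmpty) line =
          ((acc ++ [cur]).map pvInterAll, pvInterAll ([] : List String), ([] : List String).isEmpty) := by
        simp [readGroupsStepA, hb, pvInterAll, PySem.Set.empty]
      have hB : pvSplitStep (acc, cur) line = (acc ++ [cur], ([] : List String)) := by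
        simp [pvSplitStep, hb]
      rw [hA, hB]; exact ih (acc ++ [cur]) []
    · have hA : readGroupsStepA (acc.map pvInterAll, pvInterAll cur, cur.isEmpty) line =
          (acc.map pvInterAll, pvInterAll (cur ++ [PySem.Str.strip line]),
           (cur ++ [PySem.Str.strip line]).isEmpty) := by
        cases cur with
        | nil => simp [readGroupsStepA, hb, pvInterAll, PySem.Set.ofList_eq_foldl, PySem.Set.empty]
        | cons a t =>
          rw [pvInterAll_append (a :: t) _ (by simp)]
          simp [readGroupsStepA, hb]
      have hB : pvSplitStep (acc, cur) line = (acc, cur ++ [PySem.Str.strip line]) := by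
        simp [pvSplitStep, hb]
      rw [hA, hB]; exact ih acc (cur ++ [PySem.Str.strip line])

-- ===== VERDICT (by name: the statement is the Claim_ definition above) =====
theorem readGroups_spec : Claim_equal_readGroups := by
  intro lines _
  unfold Spec_readGroups readGroups readGroups_alt pvSplitGroups
  show (lines.foldl readGroupsStepA (([] : List (List String)).map pvInterAll, pvInterAll [], ([] : List String).isEmpty)).1
        ++ [(lines.foldl readGroupsStepA (([] : List (List String)).map pvInterAll, pvInterAll [], ([] : List String).isEmpty)).2.1]
      = ((lines.foldl pvSplitStep ([], [])).1 ++ [(lines.foldl pvSplitStep ([], [])).2]).map pvInterAll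
  rw [pv_main lines [] []]
  simp
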